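-- pv_equiv track=rewrite | github.com/adam-berlak/REL-Studios-Music-Robot | RELMusicTheory/MusicCollections/IntervalListUtilities.py | binaryToIntervalListUtilitiesSteps
-- ===== SOURCE A (Python) =====
-- def binaryToIntervalListUtilitiesSteps(p_binary):
--
--     binary = p_binary[len(p_binary)::-1]
--     binary = (binary + binary[0])[1:]
--     scale_steps = []
--     semitones = 0
--
--     for i in range(len(binary)):
--         if (binary[i] == '0'): semitones = semitones + 1
--         else:
--             semitones = semitones + 1
--             scale_steps.append(semitones)
--             semitones = 0
--
--     return scale_steps
-- ===== SOURCE B (Python) =====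
-- def binaryToIntervalListUtilitiesSteps(p_binary):
--     # Same preprocessing as A (reverse, rotate left by one), then index the
--     # set-bit positions once and emit consecutive differences instead of
--     # accumulating-and-resetting in one sweep. Returns [] on empty input.
--     if not p_binary:
--         return []
--     rev = p_binary[::-1]
--     binary = rev[1:] + rev[0]
--     positions = [i for i, c in enumerate(binary) if c != '0']
--     if not positions:
--         return []
--     return [positions[0] + 1] + [b - a for a, b in zip(positions, positions[1:])]
-- ===== Notes on version B (the rewrite author's own statement) =====
-- stated objective: alternative
-- what changed: Instead of A's single sweep that accumulates a semitone counter and resets it at each set bit, B collects the indices of the set bits of the rotated reversed string once and produces the steps as consecutive differences (first position plus one, then pairwise diffs).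
import Mathlib
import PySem

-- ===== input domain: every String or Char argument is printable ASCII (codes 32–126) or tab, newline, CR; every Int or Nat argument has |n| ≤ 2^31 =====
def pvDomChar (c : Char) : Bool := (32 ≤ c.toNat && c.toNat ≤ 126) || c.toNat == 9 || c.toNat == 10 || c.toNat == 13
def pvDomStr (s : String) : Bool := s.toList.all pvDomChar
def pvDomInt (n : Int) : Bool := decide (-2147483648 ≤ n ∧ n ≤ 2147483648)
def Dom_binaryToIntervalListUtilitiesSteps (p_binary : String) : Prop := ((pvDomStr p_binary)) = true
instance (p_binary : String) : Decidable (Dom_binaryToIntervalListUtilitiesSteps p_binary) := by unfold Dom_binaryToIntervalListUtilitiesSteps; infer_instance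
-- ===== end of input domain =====

-- B replaces A's accumulate-and-reset sweep by indexing the set-bit positions
-- once and emitting consecutive differences (objective: alternative, same cost).

-- ===== PORT A =====
def binaryToIntervalListUtilitiesSteps (p_binary : String) : List Int :=
  -- binary = p_binary[len(p_binary)::-1]
  match PySem.List.slice? p_binary.toList (some (p_binary.toList.length : Int)) none (-1) with
  | none => []          -- unreachable: step -1 ≠ 0
  | some rev =>
    -- binary = (binary + binary[0])[1:]
    match PySem.List.pyGet? rev 0 with
    | none => []        -- Python raises IndexError here (empty input); excluded by Pre_
    | some c0 =>
      let binary := PySem.List.slice (rev ++ [c0]) (some 1) none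
      -- for i in range(len(binary)): accumulate / reset
      (((PySem.List.pyRange 0 (PySem.List.len binary) 1).foldl
          (fun (st : List Int × Int) i =>
            if PySem.List.pyGetD binary i ' ' == '0' then (st.1, st.2 + 1)
            else (st.1 ++ [st.2 + 1], 0))
          ([], 0)).1)

-- ===== PORT B =====
def binaryToIntervalListUtilitiesSteps_alt (p_binary : String) : List Int :=
  match p_binary.toList.reverse with          -- rev = p_binary[::-1]; empty input → []
  | [] => []
  | c :: t =>
    let binary := t ++ [c]                    -- binary = rev[1:] + rev[0]
    let positions := ((PySem.List.enumerate binary 0).filter (fun q => q.2 != '0')).map (fun q => q.1)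
    match positions with
    | [] => []
    | p0 :: _ =>
      (p0 + 1) :: (positions.zip positions.tail).map (fun ab => ab.2 - ab.1)

-- ===== PRECONDITION & SPEC =====
-- Pre_ excludes only the empty string, on which the Python A raises IndexError (binary[0]).
def Pre_binaryToIntervalListUtilitiesSteps (p_binary : String) : Prop := p_binary.toList ≠ []
instance (p_binary : String) : Decidable (Pre_binaryToIntervalListUtilitiesSteps p_binary) := by unfold Pre_binaryToIntervalListUtilitiesSteps; infer_instance
def pvWitness_binaryToIntervalListUtilitiesSteps : String := "101"

def Spec_binaryToIntervalListUtilitiesSteps (p_binary : String) (out : List Int) : Prop := out = binaryToIntervalListUtilitiesSteps_alt p_binary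
instance (p_binary : String) (out : List Int) : Decidable (Spec_binaryToIntervalListUtilitiesSteps p_binary out) := by unfold Spec_binaryToIntervalListUtilitiesSteps; infer_instance

-- ===== CLAIM (what is proved, stated in full; the proofs are below) =====
def Claim_equal_binaryToIntervalListUtilitiesSteps : Prop := ∀ (p_binary : String), Dom_binaryToIntervalListUtilitiesSteps p_binary → Pre_binaryToIntervalListUtilitiesSteps p_binary → Spec_binaryToIntervalListUtilitiesSteps p_binary (binaryToIntervalListUtilitiesSteps p_binary)

-- ===== LEMMAS AND PROOFS =====

-- the step sequence A's sweep produces from a char list, starting with a partial count s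
def fSteps : List Char → Int → List Int
  | [], _ => []
  | c :: t, s => if c == '0' then fSteps t (s + 1) else (s + 1) :: fSteps t 0

-- the indices of the non-'0' characters, as B computes them, starting at offset j
def posL (l : List Char) (j : Int) : List Int :=
  ((PySem.List.enumerate l j).filter (fun q => q.2 != '0')).map (fun q => q.1)

-- B's consecutive-difference pass
def dDiffs (ps : List Int) : List Int := (ps.zip ps.tail).map (fun ab => ab.2 - ab.1)

theorem posL_nil (j : Int) : posL [] j = [] := rfl

theorem posL_cons (c : Char) (t : List Char) (j : Int) :
    posL (c :: t) j = if c == '0' then posL t (j + 1) else j :: posL t (j + 1) := by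
  simp only [posL, PySem.List.enumerate_cons, List.filter_cons]
  by_cases h : c = '0' <;> simp [h]

theorem dDiffs_cons (a b : Int) (r : List Int) :
    dDiffs (a :: b :: r) = (b - a) :: dDiffs (b :: r) := rfl

-- A's sweep, expressed as a fold over the char list, produces acc ++ fSteps l s
theorem foldA_eq_fSteps (l : List Char) (acc : List Int) (s : Int) :
    (l.foldl (fun (st : List Int × Int) c =>
        if c == '0' then (st.1, st.2 + 1) else (st.1 ++ [st.2 + 1], 0)) (acc, s)).1
      = acc ++ fSteps l s := by
  induction l generalizing acc s with
  | nil => simp [fSteps]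
  | cons c t ih =>
    simp only [List.foldl_cons, fSteps]
    by_cases h : c = '0'
    · have hb : (c == '0') = true := by simp [h]
      rw [hb]
      simpa using ih acc (s + 1)
    · have hb : (c == '0') = false := by simp [h]
      rw [hb]
      simp only [Bool.false_eq_true, if_false]
      rw [ih (acc ++ [s + 1]) 0]
      simp

-- fSteps equals B's first-position + consecutive-differences form
theorem fSteps_eq_pos (l : List Char) (j s : Int) :
    fSteps l s = match posL l j with
      | [] => []
      | p0 :: rest => (s + (p0 - j) + 1) :: dDiffs (p0 :: rest) := by
  induction l generalizing j s with
  | nil => simp [fSteps, posL_nil]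
  | cons c t ih =>
    rw [posL_cons]
    by_cases h : c = '0'
    · subst h
      simp only [fSteps, beq_self_eq_true, if_true]
      rw [ih (j + 1) (s + 1)]
      cases hp : posL t (j + 1) with
      | nil => rfl
      | cons p0 rest => simp only; congr 2; ring
    · have hb : (c == '0') = false := by simp [h]
      simp only [fSteps, hb, if_false, Bool.false_eq_true]
      rw [ih (j + 1) 0]
      cases hp : posL t (j + 1) with
      | nil => simp only [dDiffs, List.zip_nil_right, List.tail, List.map_nil]; congr 1; ring
      | cons p0 rest =>
        simp only [dDiffs_cons]
        congr 2 <;> ring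

-- A's preprocessing slice p[len::-1] is the full reverse
theorem sliceA_eq_reverse (xs : List Char) :
    PySem.List.slice? xs (some (xs.length : Int)) none (-1) = some xs.reverse := by
  have h : PySem.List.sliceIndices xs.length (some (xs.length : Int)) none (-1)
      = PySem.List.sliceIndices xs.length none none (-1) := by
    simp [PySem.List.sliceIndices]
  rw [show PySem.List.slice? xs (some (xs.length : Int)) none (-1)
        = PySem.List.slice? xs none none (-1) by simp [PySem.List.slice?, h]]
  exact PySem.List.slice?_none_none_neg_one xs

-- ===== VERDICT (by name: the statement is the Claim_ definition above) =====
theorem binaryToIntervalListUtilitiesSteps_spec : Claim_equal_binaryToIntervalListUtilitiesSteps := by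
  intro p _ hpre
  unfold Spec_binaryToIntervalListUtilitiesSteps
  unfold binaryToIntervalListUtilitiesSteps binaryToIntervalListUtilitiesSteps_alt
  rw [sliceA_eq_reverse]
  cases hrev : p.toList.reverse with
  | nil =>
    exact absurd (by simpa using congrArg List.reverse hrev) hpre
  | cons c t =>
    simp only [PySem.List.pyGet?_zero_cons]
    have hbin : PySem.List.slice ((c :: t) ++ [c]) (some 1) none = t ++ [c] := by
      rw [PySem.List.slice_from_one]; rfl
    simp only [hbin]
    rw [PySem.List.foldl_pyRange_pyGetD (t ++ [c]) ' '
          (fun (st : List Int × Int) c =>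
            if c == '0' then (st.1, st.2 + 1) else (st.1 ++ [st.2 + 1], 0))
          ([], 0) (by omega)]
    simp only [Int.toNat_zero, List.drop_zero]
    rw [foldA_eq_fSteps (t ++ [c]) [] 0, List.nil_append]
    rw [fSteps_eq_pos (t ++ [c]) 0 0]
    unfold posL
    cases hp : ((PySem.List.enumerate (t ++ [c]) 0).filter (fun q => q.2 != '0')).map (fun q => q.1) with
    | nil => rfl
    | cons p0 rest =>
      simp only [show (0:Int) + (p0 - 0) + 1 = p0 + 1 by ring]
      rfl
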